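-- pv_equiv track=rewrite | github.com/masterxlp/The-Method-of-Programming | string_exercises/1_习题_15.py | map01
-- ===== SOURCE A (Python) =====
-- def map01(string):
--
--     # Map and count 01
--     # Initialize dictionary
--     map_result = {'0': 0, '1': 0}
--     for char in string:
--         if char is '0':
--             map_result['0'] += 1
--         else:
--             map_result['1'] += 1
--
--     return map_result
-- ===== SOURCE B (Python) =====
-- def map01(string):
--     # Stage 1: full per-character histogram (no '0' test inside the loop).
--     freq = {}
--     for ch in string:
--         freq[ch] = freq.get(ch, 0) + 1
--     # Stage 2: aggregate the histogram into the two buckets.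
--     return {'0': freq.get('0', 0),
--             '1': sum(n for ch, n in freq.items() if ch != '0')}
-- ===== Notes on version B (the rewrite author's own statement) =====
-- stated objective: alternative
-- what changed: Instead of testing each character against '0' and incrementing one of two counters, B first builds a full per-character frequency histogram in one untested pass, then aggregates it afterwards: the '0' bucket is a single lookup and the '1' bucket is the sum of all other histogram entries.
import Mathlib
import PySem

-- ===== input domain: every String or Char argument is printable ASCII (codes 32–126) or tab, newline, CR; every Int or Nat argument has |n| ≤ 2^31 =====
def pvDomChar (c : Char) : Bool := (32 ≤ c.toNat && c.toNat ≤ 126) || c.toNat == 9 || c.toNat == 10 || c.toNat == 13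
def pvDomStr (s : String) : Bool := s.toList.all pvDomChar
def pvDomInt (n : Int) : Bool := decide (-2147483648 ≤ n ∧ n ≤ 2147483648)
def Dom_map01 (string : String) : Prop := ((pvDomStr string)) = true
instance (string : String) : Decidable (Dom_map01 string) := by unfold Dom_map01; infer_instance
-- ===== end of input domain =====

-- B builds a full per-character frequency histogram first (no '0' test in the loop), then
-- aggregates: '0' bucket by one lookup, '1' bucket by summing all other histogram entries
-- (objective: alternative).
-- Note: A's `char is '0'` behaves as `==` for single-character CPython strings (interning).

-- ===== PORT A =====
def map01 (string : String) : List (String × Int) :=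
  -- map_result = {'0': 0, '1': 0}
  let init : PySem.Dict String Int := (PySem.Dict.empty.insert "0" 0).insert "1" 0
  -- for char in string: if char is '0': map_result['0'] += 1 else: map_result['1'] += 1
  (string.toList.foldl
    (fun d char =>
      if char == '0' then d.modify "0" 0 (· + 1) else d.modify "1" 0 (· + 1))
    init).items

-- ===== PORT B =====
def map01_alt (string : String) : List (String × Int) :=
  -- freq = {}; for ch in string: freq[ch] = freq.get(ch, 0) + 1
  let freq : PySem.Dict Char Int :=
    string.toList.foldl (fun d ch => d.insert ch (d.getD ch 0 + 1)) PySem.Dict.empty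
  -- return {'0': freq.get('0', 0), '1': sum(n for ch, n in freq.items() if ch != '0')}
  [("0", freq.getD '0' 0),
   ("1", ((freq.items.filter (fun p => p.1 != '0')).map (·.2)).sum)]

-- ===== PRECONDITION & SPEC =====
def Spec_map01 (string : String) (out : List (String × Int)) : Prop := out = map01_alt string
instance (string : String) (out : List (String × Int)) : Decidable (Spec_map01 string out) := by unfold Spec_map01; infer_instance

-- ===== CLAIM (what is proved, stated in full; the proofs are below) =====
def Claim_equal_map01 : Prop := ∀ (string : String), Dom_map01 string → Spec_map01 string (map01 string)

-- ===== LEMMAS AND PROOFS =====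

-- the dictionary state A's loop maintains: keys "0" and "1" with the two counters
def pvMkD (a b : Int) : PySem.Dict String Int :=
  (PySem.Dict.empty.insert "0" a).insert "1" b

theorem pvMkD_modify1 (a b : Int) : (pvMkD a b).modify "1" 0 (· + 1) = pvMkD a (b + 1) := rfl

theorem pvLoop (l : List Char) : ∀ (a b : Int),
    (l.foldl (fun d char =>
        if char == '0' then d.modify "0" 0 (· + 1) else d.modify "1" 0 (· + 1)) (pvMkD a b)).items
      = [("0", a + (l.count '0' : Int)), ("1", b + (l.countP (fun c => !(c == '0')) : Int))] := by
  induction l with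
  | nil => intro a b; simp [pvMkD]; rfl
  | cons c l ih =>
    intro a b
    by_cases h : c = '0'
    · subst h
      have hstep : (List.foldl (fun d char =>
          if char == '0' then d.modify "0" 0 (· + 1) else d.modify "1" 0 (· + 1))
          (pvMkD a b) ('0' :: l))
        = List.foldl (fun d char =>
          if char == '0' then d.modify "0" 0 (· + 1) else d.modify "1" 0 (· + 1))
          (pvMkD (a + 1) b) l := rfl
      rw [hstep, ih]
      simp
      ring
    · have hb : (c == '0') = false := by simp [h]
      have hf : (if c == '0' then (pvMkD a b).modify "0" 0 (· + 1)
            else (pvMkD a b).modify "1" 0 (· + 1)) = pvMkD a (b + 1) := by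
        simp [hb, pvMkD_modify1]
      rw [List.foldl_cons, hf, ih]
      simp [h]
      ring

-- PySem's first-occurrence dedup is a permutation of Mathlib's last-occurrence List.dedup
theorem pvOfList_perm_dedup (l : List Char) : (PySem.Set.ofList l).Perm l.dedup := by
  rw [List.perm_ext_iff_of_nodup (PySem.Set.nodup_ofList l) l.nodup_dedup]
  intro x
  rw [PySem.Set.mem_ofList, List.mem_dedup]

-- B's second bucket: summing the histogram entries of the keys ≠ '0' counts the non-'0' characters
theorem pvSum_nonzero (l : List Char) :
    ((((PySem.Set.ofList l).filter (fun k => k ≠ '0')).map (fun k => l.count k)).sum : ℕ)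
      = l.countP (fun c => !(c == '0')) := by
  have hperm : (((PySem.Set.ofList l).filter (fun k => decide (k ≠ '0'))).map (fun k => l.count k)).Perm
      ((l.dedup.filter (fun k => decide (k ≠ '0'))).map (fun k => l.count k)) :=
    ((pvOfList_perm_dedup l).filter _).map _
  have := List.sum_map_count_dedup_filter_eq_countP (fun k => decide (k ≠ '0')) l
  calc ((((PySem.Set.ofList l).filter (fun k => decide (k ≠ '0'))).map (fun k => l.count k)).sum : ℕ)
      = ((l.dedup.filter (fun k => decide (k ≠ '0'))).map (fun k => l.count k)).sum := hperm.sum_eq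
    _ = l.countP (fun k => decide (k ≠ '0')) := this
    _ = l.countP (fun c => !(c == '0')) := by
        apply List.countP_congr; intro x _; simp

-- ===== VERDICT (by name: the statement is the Claim_ definition above) =====
theorem map01_spec : Claim_equal_map01 := by
  intro s _
  unfold Spec_map01 map01 map01_alt
  have hinit : ((PySem.Dict.empty.insert "0" (0:Int)).insert "1" 0) = pvMkD 0 0 := rfl
  rw [hinit, pvLoop s.toList 0 0]
  set l := s.toList with hl
  rw [PySem.Dict.foldl_insert_getD_add_one_eq_counter]
  have hzero : (PySem.Dict.counter l).getD '0' 0 = (l.count '0' : Int) :=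
    PySem.Dict.getD_counter l '0'
  have hitems := PySem.Dict.items_counter (xs := l)
  simp only [hzero, hitems]
  have hfm : ((((PySem.Set.ofList l).map (fun k => (k, (l.count k : Int)))).filter
        (fun p => p.1 != '0')).map (fun p => p.2))
      = (((PySem.Set.ofList l).filter (fun k => k ≠ '0')).map (fun k => (l.count k : Int))) := by
    rw [List.filter_map, List.map_map]
    congr 1
    apply List.filter_congr
    intro x _
    by_cases h : x = '0'
    · simp [h]
    · simp [h]
  simp only [hfm]
  have hsum : ((((PySem.Set.ofList l).filter (fun k => k ≠ '0')).map
        (fun k => (l.count k : Int))).sum)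
      = ((l.countP (fun c => !(c == '0')) : ℕ) : Int) := by
    rw [← pvSum_nonzero l]
    rw [show (fun k => (l.count k : Int)) = (fun n : ℕ => (n : Int)) ∘ (fun k => l.count k) from rfl,
        ← List.map_map]
    exact (Nat.cast_list_sum _).symm
  rw [hsum]
  norm_num
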